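-- pv_equiv track=rewrite | github.com/iluvjava/Fucking_LeetCode_ShitLikeThat | HackerRank/problems/Candies/solution.py | solution_simple_recur_mem
-- ===== SOURCE A (Python) =====
-- def solution_simple_recur_mem(arr):
--     T = {}
--     def min_candy_for(i):
--         if i >= len(arr) or i < 0:
--             return 0
--         if i in T:
--             return T[i]
--         ScoreLeft = 0 if i - 1 < 0 else arr[i - 1]
--         ScoreRight = 0 if i + 1 >= len(arr) else arr[i + 1]
--         LowerBoundLeft = min_candy_for(i - 1) + 1 if arr[i] > ScoreLeft \
--             else 1
--         LowerBoundRight = min_candy_for(i + 1) + 1 if arr[i] > ScoreRight\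
--             else 1
--         T[i] = max(LowerBoundLeft, LowerBoundRight)
--         return T[i]
--
--     Candies = []
--     for I in range(len(arr)):
--         Candies.append(min_candy_for(I))
--
--     return sum(Candies)
-- ===== SOURCE B (Python) =====
-- def solution_simple_recur_mem(arr):
--     def sweep(xs):
--         out = []
--         prev = None
--         run = 0
--         for x in xs:
--             run = run + 1 if prev is not None and x > prev else 1
--             out.append(run)
--             prev = x
--         return out
--     left = sweep(arr)
--     right = sweep(arr[::-1])[::-1]
--     return sum(max(l, r) for l, r in zip(left, right))
-- ===== Notes on version B (the rewrite author's own statement) =====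
-- stated objective: faster
-- what changed: Replaced the per-index memoized bidirectional recursion with two linear directed sweeps (a left sweep, and a left sweep of the reversed list) summed pointwise by max.
import Mathlib
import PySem

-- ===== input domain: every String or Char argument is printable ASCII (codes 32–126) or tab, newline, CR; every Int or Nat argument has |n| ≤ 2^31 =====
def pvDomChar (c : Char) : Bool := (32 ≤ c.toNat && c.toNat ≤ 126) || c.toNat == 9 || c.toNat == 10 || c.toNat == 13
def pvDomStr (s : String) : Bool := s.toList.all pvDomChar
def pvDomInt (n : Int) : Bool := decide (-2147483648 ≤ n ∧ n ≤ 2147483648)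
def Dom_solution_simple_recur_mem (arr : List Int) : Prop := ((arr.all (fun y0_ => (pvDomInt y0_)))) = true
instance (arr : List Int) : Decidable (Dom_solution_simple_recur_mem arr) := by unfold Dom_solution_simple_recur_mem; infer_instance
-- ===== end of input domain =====

-- B replaces A's memoized bidirectional recursion by two directed linear sweeps combined pointwise
-- by max; the return values agree on all inputs (objective: faster by a constant factor in Python).

-- ===== PORT A =====
-- Port of A's inner recursion `min_candy_for`. The memo dict T of the Python only caches values
-- (a recomputation returns exactly the cached value), so the port recomputes instead of caching;
-- `fuel` (called with arr.length + 1, enough for every chain this recursion follows) only makes the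
-- same recursion structurally terminating — branches, comparisons and values are A's, step for step.
def minCandyFor (arr : List Int) : Nat → Int → Int
  | 0, _ => 0
  | fuel + 1, i =>
    if i ≥ (arr.length : Int) ∨ i < 0 then 0
    else
      let scoreLeft : Int := if i - 1 < 0 then 0 else PySem.List.pyGetD arr (i - 1) 0
      let scoreRight : Int := if i + 1 ≥ (arr.length : Int) then 0 else PySem.List.pyGetD arr (i + 1) 0
      let lowerBoundLeft := if PySem.List.pyGetD arr i 0 > scoreLeft then minCandyFor arr fuel (i - 1) + 1 else 1
      let lowerBoundRight := if PySem.List.pyGetD arr i 0 > scoreRight then minCandyFor arr fuel (i + 1) + 1 else 1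
      max lowerBoundLeft lowerBoundRight

def solution_simple_recur_mem (arr : List Int) : Int :=
  let candies := (PySem.List.pyRange 0 (arr.length : Int) 1).map
    (fun I => minCandyFor arr (arr.length + 1) I)
  candies.foldl (· + ·) 0

-- ===== PORT B =====
-- Source B's `sweep` loop: state (out, prev, run); the for-loop is the structural recursion on the list.
def sweepAux (prev : Option Int) (run : Int) : List Int → List Int
  | [] => []
  | x :: xs =>
      let run' : Int := match prev with
        | some p => if x > p then run + 1 else 1
        | none => 1
      run' :: sweepAux (some x) run' xs

def sweep (xs : List Int) : List Int := sweepAux none 0 xs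

def solution_simple_recur_mem_alt (arr : List Int) : Int :=
  let left := sweep arr
  let right := (sweep arr.reverse).reverse
  (left.zip right).foldl (fun acc p => acc + max p.1 p.2) 0

-- ===== PRECONDITION & SPEC =====
def Spec_solution_simple_recur_mem (arr : List Int) (out : Int) : Prop := out = solution_simple_recur_mem_alt arr
instance (arr : List Int) (out : Int) : Decidable (Spec_solution_simple_recur_mem arr out) := by unfold Spec_solution_simple_recur_mem; infer_instance

-- ===== CLAIM (what is proved, stated in full; the proofs are below) =====
def Claim_equal_solution_simple_recur_mem : Prop := ∀ (arr : List Int), Dom_solution_simple_recur_mem arr → Spec_solution_simple_recur_mem arr (solution_simple_recur_mem arr)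

-- ===== LEMMAS AND PROOFS =====
-- Lv arr i: the left-sweep candy value at index i; Rv arr i: the right-sweep value.
-- minCandy_main characterises A's recursion as max (Lv i) (Rv i); the sweep lemmas characterise B.
def Lv (arr : List Int) : Nat → Int
  | 0 => 1
  | i + 1 => if arr.getD (i + 1) 0 > arr.getD i 0 then Lv arr i + 1 else 1


theorem Lv_pos (arr : List Int) (i : Nat) : 1 ≤ Lv arr i := by
  cases i with
  | zero => simp [Lv]
  | succ n =>
    simp only [Lv]; split
    · linarith [Lv_pos arr n]
    · rfl

theorem minCandy_out (arr : List Int) (fuel : Nat) (j : Int)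
    (h : j < 0 ∨ (arr.length : Int) ≤ j) : minCandyFor arr fuel j = 0 := by
  cases fuel with
  | zero => rfl
  | succ f => unfold minCandyFor; rw [if_pos]; omega


theorem minCandy_succ (arr : List Int) (f : Nat) (i : Nat) (hi : i < arr.length) :
    minCandyFor arr (f + 1) (i : Int) =
      max (if 0 < i ∧ arr.getD i 0 > arr.getD (i - 1) 0 then minCandyFor arr f ((i : Int) - 1) + 1 else 1)
          (if i + 1 < arr.length ∧ arr.getD i 0 > arr.getD (i + 1) 0 then minCandyFor arr f ((i : Int) + 1) + 1 else 1) := by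
  conv_lhs => rw [minCandyFor]
  rw [if_neg (by omega)]
  simp only []
  congr 1
  · -- left argument of max
    cases i with
    | zero =>
      rw [if_pos (show ((0:Nat):Int) - 1 < 0 by omega)]
      rw [if_neg (by omega : ¬(0 < 0 ∧ arr.getD 0 0 > arr.getD (0 - 1) 0))]
      split
      · rw [minCandy_out arr f _ (by omega)]; omega
      · rfl
    | succ n =>
      rw [if_neg (show ¬(((n+1:Nat):Int) - 1 < 0) by omega)]
      have l1 : ((n + 1 : Nat) : Int) - 1 = ((n : Nat) : Int) := by omega
      rw [l1]
      simp only [PySem.List.pyGetD_natCast, Nat.add_sub_cancel]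
      rw [if_congr (by omega : (arr.getD (n+1) 0 > arr.getD n 0) ↔ (0 < n + 1 ∧ arr.getD (n+1) 0 > arr.getD n 0)) rfl rfl]
  · -- right argument of max
    by_cases hb : i + 1 < arr.length
    · rw [if_neg (show ¬((i : Int) + 1 ≥ (arr.length : Int)) by omega)]
      have l2 : ((i : Nat) : Int) + 1 = ((i + 1 : Nat) : Int) := by omega
      rw [l2]
      simp only [PySem.List.pyGetD_natCast]
      rw [if_congr (by omega : (arr.getD i 0 > arr.getD (i+1) 0) ↔ (i + 1 < arr.length ∧ arr.getD i 0 > arr.getD (i+1) 0)) rfl rfl]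
    · rw [if_pos (show (i : Int) + 1 ≥ (arr.length : Int) by omega)]
      rw [if_neg (by omega : ¬(i + 1 < arr.length ∧ arr.getD i 0 > arr.getD (i + 1) 0))]
      simp only [PySem.List.pyGetD_natCast]
      split
      · rw [minCandy_out arr f _ (by omega)]; omega
      · rfl

def Rv (arr : List Int) (i : Nat) : Int :=
  if _h : i + 1 < arr.length then
    (if arr.getD i 0 > arr.getD (i + 1) 0 then Rv arr (i + 1) + 1 else 1)
  else 1
termination_by arr.length - i

theorem Rv_pos (arr : List Int) (i : Nat) : 1 ≤ Rv arr i := by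
  unfold Rv; split
  · split
    · linarith [Rv_pos arr (i + 1)]
    · rfl
  · rfl
termination_by arr.length - i

theorem minCandy_L (arr : List Int) : ∀ (fuel : Nat) (i : Nat), i < arr.length → i + 1 ≤ fuel →
    (¬ (i + 1 < arr.length ∧ arr.getD i 0 > arr.getD (i + 1) 0)) →
    minCandyFor arr fuel (i : Int) = Lv arr i := by
  intro fuel i
  induction i generalizing fuel with
  | zero =>
    intro hn hf hR
    obtain ⟨f, rfl⟩ : ∃ f, fuel = f + 1 := ⟨fuel - 1, by omega⟩
    rw [minCandy_succ arr f 0 hn]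
    rw [if_neg (by omega : ¬(0 < 0 ∧ arr.getD 0 0 > arr.getD (0 - 1) 0))]
    rw [if_neg hR]
    simp [Lv]
  | succ n ih =>
    intro hn hf hR
    obtain ⟨f, rfl⟩ : ∃ f, fuel = f + 1 := ⟨fuel - 1, by omega⟩
    rw [minCandy_succ arr f (n + 1) hn]
    rw [if_neg hR]
    simp only [Nat.add_sub_cancel]
    by_cases hc : arr.getD (n + 1) 0 > arr.getD n 0
    · rw [if_pos ⟨by omega, hc⟩]
      rw [show ((n + 1 : Nat) : Int) - 1 = ((n : Nat) : Int) by omega]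
      rw [ih f (by omega) (by omega) (by rintro ⟨-, h2⟩; omega)]
      have h1 : Lv arr (n + 1) = Lv arr n + 1 := by simp only [Lv]; rw [if_pos hc]
      have h2 := Lv_pos arr n
      omega
    · rw [if_neg (by rintro ⟨-, h2⟩; omega)]
      have h1 : Lv arr (n + 1) = 1 := by simp only [Lv]; rw [if_neg hc]
      omega

theorem Rv_succ (arr : List Int) (i : Nat) (h : i + 1 < arr.length)
    (hc : arr.getD i 0 > arr.getD (i + 1) 0) : Rv arr i = Rv arr (i + 1) + 1 := by
  rw [Rv]; rw [dif_pos h, if_pos hc]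

theorem Rv_one (arr : List Int) (i : Nat)
    (hc : ¬(i + 1 < arr.length ∧ arr.getD i 0 > arr.getD (i + 1) 0)) : Rv arr i = 1 := by
  rw [Rv]
  split
  · rw [if_neg (by tauto)]
  · rfl

theorem minCandy_R (arr : List Int) (fuel : Nat) (i : Nat) (hi : i < arr.length)
    (hf : arr.length - i ≤ fuel)
    (hL : ¬ (0 < i ∧ arr.getD i 0 > arr.getD (i - 1) 0)) :
    minCandyFor arr fuel (i : Int) = Rv arr i := by
  obtain ⟨f, rfl⟩ : ∃ f, fuel = f + 1 := ⟨fuel - 1, by omega⟩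
  rw [minCandy_succ arr f i hi]
  rw [if_neg hL]
  by_cases hc : i + 1 < arr.length ∧ arr.getD i 0 > arr.getD (i + 1) 0
  · rw [if_pos hc]
    rw [show ((i : Nat) : Int) + 1 = ((i + 1 : Nat) : Int) by omega]
    rw [minCandy_R arr f (i + 1) hc.1 (by omega) (by rintro ⟨-, h2⟩; simp only [Nat.add_sub_cancel] at h2; omega)]
    rw [Rv_succ arr i hc.1 hc.2]
    have := Rv_pos arr (i + 1)
    omega
  · rw [if_neg hc, Rv_one arr i hc]
    omega
termination_by arr.length - i

theorem minCandy_main (arr : List Int) (i : Nat) (hi : i < arr.length) :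
    minCandyFor arr (arr.length + 1) (i : Int) = max (Lv arr i) (Rv arr i) := by
  rw [minCandy_succ arr arr.length i hi]
  have hl : (if 0 < i ∧ arr.getD i 0 > arr.getD (i - 1) 0 then minCandyFor arr arr.length ((i : Int) - 1) + 1 else 1) = Lv arr i := by
    by_cases hc : 0 < i ∧ arr.getD i 0 > arr.getD (i - 1) 0
    · rw [if_pos hc]
      obtain ⟨n, rfl⟩ : ∃ n, i = n + 1 := ⟨i - 1, by omega⟩
      simp only [Nat.add_sub_cancel] at hc
      rw [show ((n + 1 : Nat) : Int) - 1 = ((n : Nat) : Int) by omega]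
      rw [minCandy_L arr arr.length n (by omega) (by omega) (by rintro ⟨-, h2⟩; omega)]
      simp only [Lv]
      rw [if_pos hc.2]
    · rw [if_neg hc]
      cases i with
      | zero => rfl
      | succ n =>
        simp only [Nat.add_sub_cancel] at hc
        simp only [Lv]
        rw [if_neg (by intro h; exact hc ⟨by omega, h⟩)]
  have hr : (if i + 1 < arr.length ∧ arr.getD i 0 > arr.getD (i + 1) 0 then minCandyFor arr arr.length ((i : Int) + 1) + 1 else 1) = Rv arr i := by
    by_cases hc : i + 1 < arr.length ∧ arr.getD i 0 > arr.getD (i + 1) 0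
    · rw [if_pos hc]
      rw [show ((i : Nat) : Int) + 1 = ((i + 1 : Nat) : Int) by omega]
      rw [minCandy_R arr arr.length (i + 1) hc.1 (by omega) (by rintro ⟨-, h2⟩; simp only [Nat.add_sub_cancel] at h2; omega)]
      rw [Rv_succ arr i hc.1 hc.2]
    · rw [if_neg hc, Rv_one arr i hc]
  rw [hl, hr]

theorem sweepAux_drop (arr : List Int) (k : Nat) (hk : k < arr.length) :
    sweepAux (some (arr.getD k 0)) (Lv arr k) (arr.drop (k + 1)) =
      (List.range' (k + 1) (arr.length - (k + 1))).map (Lv arr) := by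
  by_cases h : k + 1 < arr.length
  · rw [List.drop_eq_getElem_cons h]
    simp only [sweepAux]
    have hx : arr[k + 1]'h = arr.getD (k + 1) 0 := (List.getD_eq_getElem arr 0 h).symm
    have hrun : (if arr[k + 1]'h > arr.getD k 0 then Lv arr k + 1 else 1) = Lv arr (k + 1) := by
      rw [hx]; simp only [Lv]
    rw [hrun, hx, sweepAux_drop arr (k + 1) h]
    rw [show arr.length - (k + 1) = (arr.length - (k + 2)) + 1 by omega, List.range'_succ]
    simp
  · rw [List.drop_eq_nil_of_le (by omega), show arr.length - (k + 1) = 0 by omega]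
    rfl
termination_by arr.length - k

theorem sweep_eq (arr : List Int) : sweep arr = (List.range arr.length).map (Lv arr) := by
  cases arr with
  | nil => rfl
  | cons x xs =>
    show sweepAux none 0 (x :: xs) = _
    simp only [sweepAux]
    have h0 : (0 : Nat) < (x :: xs).length := by simp
    have := sweepAux_drop (x :: xs) 0 h0
    rw [show (0 : Nat) + 1 = 1 from rfl] at this
    simp only [List.drop_one, List.tail_cons, List.getD_cons_zero] at this
    rw [show (1 : Int) = Lv (x :: xs) 0 from rfl, this]
    rw [List.range_eq_range', show (x :: xs).length = ((x :: xs).length - 1) + 1 by simp, List.range'_succ]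
    simp [Lv]

theorem Rv_rev (arr : List Int) (i : Nat) (hi : i < arr.length) :
    Rv arr i = Lv arr.reverse (arr.length - 1 - i) := by
  by_cases h : i + 1 < arr.length
  · obtain ⟨m, hm⟩ : ∃ m, arr.length - 1 - i = m + 1 := ⟨arr.length - 2 - i, by omega⟩
    rw [Rv, dif_pos h, hm]
    simp only [Lv]
    have hr1 : m + 1 < arr.reverse.length := by rw [List.length_reverse]; omega
    have hr2 : m < arr.reverse.length := by rw [List.length_reverse]; omega
    have e1 : arr.reverse.getD (m + 1) 0 = arr.getD i 0 := by
      rw [List.getD_eq_getElem arr.reverse 0 hr1, List.getD_eq_getElem arr 0 (by omega),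
        List.getElem_reverse]
      congr 1; omega
    have e2 : arr.reverse.getD m 0 = arr.getD (i + 1) 0 := by
      rw [List.getD_eq_getElem arr.reverse 0 hr2, List.getD_eq_getElem arr 0 (by omega),
        List.getElem_reverse]
      congr 1; omega
    rw [e1, e2]
    by_cases hc : arr.getD i 0 > arr.getD (i + 1) 0
    · rw [if_pos hc, if_pos hc, Rv_rev arr (i + 1) (by omega),
        show arr.length - 1 - (i + 1) = m by omega]
    · rw [if_neg hc, if_neg hc]
  · rw [Rv_one arr i (by tauto), show arr.length - 1 - i = 0 by omega]
    rfl
termination_by arr.length - i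

theorem ports_agree (arr : List Int) : solution_simple_recur_mem arr = solution_simple_recur_mem_alt arr := by
  show ((PySem.List.pyRange 0 (arr.length : Int) 1).map (fun I => minCandyFor arr (arr.length + 1) I)).foldl (· + ·) 0
      = ((sweep arr).zip ((sweep arr.reverse).reverse)).foldl (fun acc p => acc + max p.1 p.2) 0
  rw [PySem.List.pyRange_zero_nat]
  rw [sweep_eq arr, sweep_eq arr.reverse, List.length_reverse]
  rw [← List.map_reverse, List.range_eq_range', List.reverse_range']
  simp only [← List.range_eq_range', List.map_map]
  have hA : ((List.range arr.length).map ((fun I => minCandyFor arr (arr.length + 1) I) ∘ (fun k : Nat => (k : Int))))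
      = (List.range arr.length).map (fun k => max (Lv arr k) (Rv arr k)) := by
    apply List.map_congr_left
    intro k hk
    exact minCandy_main arr k (List.mem_range.mp hk)
  have hB : ((List.range arr.length).map (Lv arr)).zip
        ((List.range arr.length).map ((Lv arr.reverse) ∘ (fun i => 0 + arr.length - 1 - i)))
      = (List.range arr.length).map (fun k => (Lv arr k, Rv arr k)) := by
    rw [List.zip_map']
    apply List.map_congr_left
    intro k hk
    have hk' := List.mem_range.mp hk
    simp only [Function.comp]
    rw [show 0 + arr.length - 1 - k = arr.length - 1 - k by omega, ← Rv_rev arr k hk']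
  rw [hA, hB]
  rw [List.foldl_map, List.foldl_map]

-- ===== VERDICT (by name: the statement is the Claim_ definition above) =====
theorem solution_simple_recur_mem_spec : Claim_equal_solution_simple_recur_mem := by
  intro arr _
  exact (ports_agree arr)
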